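-- pv_equiv track=rewrite | github.com/somovAleksandr/algorithms-practice | custom-problems/reverse-unique/main.py | reverse_unique
-- ===== SOURCE A (Python) =====
-- def reverse_unique(iterable):
--     """
--     Возвращает кортеж уникальных элементов в порядке их последнего вхождения
--     в оригинальный итерируемый объект, начиная с конца.
--
--     Процесс:
--     1. Создаётся копия входного объекта.
--     2. Копия переворачивается.
--     3. Проход по элементам: добавляются только первые вхождения
--        в порядке перевёрнутого списка (т.е. последние вхождения в оригинале).
--     4. Результат возвращается как кортеж.
--
--     Параметры:
--         iterable (list, tuple, etc.): итерируемый объект (с поддержкой copy() и reverse())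
--
--     Возвращает:
--         tuple: кортеж уникальных элементов в порядке от конца к началу оригинала.
--
--     Пример:
--         reverse_unique([2,1,3,1,2,5,5,9,2,0,0])
--         → (0, 2, 9, 5, 1, 3)
--     """
--     iterable_copy = iterable.copy()
--     iterable_copy.reverse()
--
--     result = []
--
--     for element in iterable_copy:
--         if element not in result:
--             result.append(element)
--
--     return tuple(result)
-- ===== SOURCE B (Python) =====
-- def reverse_unique(iterable):
--     # Build a table mapping each element to the index of its LAST occurrence
--     # (later writes overwrite earlier ones), then emit the keys sorted by that
--     # index in descending order.  No reversal, no membership scan.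
--     last = {}
--     for i, x in enumerate(iterable):
--         last[x] = i
--     return tuple(sorted(last, key=last.get, reverse=True))
-- ===== Notes on version B (the rewrite author's own statement) =====
-- stated objective: faster
-- what changed: B replaces A's copy+reverse followed by an O(n^2) membership-scan/append dedup loop with a single forward enumerate pass building a last-occurrence index dict, then returns the dict's keys sorted by that index in descending order.
import Mathlib
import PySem

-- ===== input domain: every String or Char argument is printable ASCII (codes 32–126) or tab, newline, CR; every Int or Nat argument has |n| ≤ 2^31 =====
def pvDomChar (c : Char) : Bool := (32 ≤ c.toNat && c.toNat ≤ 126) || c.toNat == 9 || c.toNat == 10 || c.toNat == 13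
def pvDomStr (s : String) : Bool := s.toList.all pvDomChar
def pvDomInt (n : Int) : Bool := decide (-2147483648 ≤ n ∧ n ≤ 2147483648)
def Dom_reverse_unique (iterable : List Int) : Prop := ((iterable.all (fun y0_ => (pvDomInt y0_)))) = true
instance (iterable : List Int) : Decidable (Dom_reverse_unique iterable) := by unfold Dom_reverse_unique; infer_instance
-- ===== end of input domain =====

-- B replaces A's copy+reverse+membership-scan dedup by a forward enumerate pass that
-- records each element's LAST index in a dict, then sorts the keys by that index
-- descending (faster: hash table + sort instead of quadratic membership scans).

-- ===== PORT A =====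
-- copy + reverse, then append each element not yet in the result; tuple() is the list itself
def reverse_unique (iterable : List Int) : List Int :=
  (iterable.reverse).foldl (fun result element =>
    if element ∈ result then result else result ++ [element]) []

-- ===== PORT B =====
-- last[x] = i over enumerate(iterable); last.get on a key of the dict always
-- returns its index, ported as getD _ 0
def reverse_unique_alt (iterable : List Int) : List Int :=
  let last : PySem.Dict Int Int :=
    (PySem.List.enumerate iterable).foldl (fun d p => d.insert p.2 p.1) PySem.Dict.empty
  PySem.List.sorted (PySem.Dict.keys last) (fun x => last.getD x 0) true

-- ===== PRECONDITION & SPEC =====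
def Spec_reverse_unique (iterable : List Int) (out : List Int) : Prop := out = reverse_unique_alt iterable
instance (iterable : List Int) (out : List Int) : Decidable (Spec_reverse_unique iterable out) := by unfold Spec_reverse_unique; infer_instance

-- ===== CLAIM (what is proved, stated in full; the proofs are below) =====
def Claim_equal_reverse_unique : Prop := ∀ (iterable : List Int), Dom_reverse_unique iterable → Spec_reverse_unique iterable (reverse_unique iterable)

-- ===== LEMMAS AND PROOFS =====

-- the last-index dict B builds
def pvLastDict (l : List Int) : PySem.Dict Int Int :=
  (PySem.List.enumerate l).foldl (fun d p => d.insert p.2 p.1) PySem.Dict.empty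

-- appending one element to the input inserts it at index l.length
theorem pvLastDict_append (l : List Int) (a : Int) :
    pvLastDict (l ++ [a]) = (pvLastDict l).insert a (l.length : Int) := by
  unfold pvLastDict
  rw [PySem.List.enumerate_append, List.foldl_append]
  simp [PySem.List.enumerate_cons, PySem.List.enumerate_nil]

-- A's dedup loop IS Set.ofList of the reversed input
theorem pvA_eq_ofList (l : List Int) :
    reverse_unique l = PySem.Set.ofList l.reverse := by
  unfold reverse_unique
  rw [PySem.Set.ofList_eq_foldl]
  apply PySem.List.foldl_congr_mem
  intro acc x _
  by_cases h : x ∈ acc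
  · simp [h]
  · simp [h]

-- Set.ofList with a general accumulator
-- A's explicit dedup loop body with a general accumulator: it appends exactly
-- the elements of its empty-accumulator run that are not already in the accumulator.
theorem pvFoldA_acc (rs : List Int) : ∀ acc : List Int,
    rs.foldl (fun result element =>
      if element ∈ result then result else result ++ [element]) acc
    = acc ++ (rs.foldl (fun result element =>
      if element ∈ result then result else result ++ [element]) []).filter
        (fun a => decide (a ∉ acc)) := by
  induction rs with
  | nil => intro acc; simp
  | cons e rs ih =>
    intro acc
    simp only [List.foldl_cons]
    have hnil : (if e ∈ ([] : List Int) then ([] : List Int) else [] ++ [e]) = [e] := by simp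
    rw [hnil, ih (if e ∈ acc then acc else acc ++ [e]), ih [e]]
    by_cases he : e ∈ acc
    · simp only [he, if_pos]
      have : ∀ (l : List Int),
          (([e] ++ l.filter (fun a => decide (a ∉ [e]))).filter (fun a => decide (a ∉ acc)))
          = l.filter (fun a => decide (a ∉ acc)) := by
        intro l
        simp only [List.filter_append, List.filter_filter]
        have h1 : ([e] : List Int).filter (fun a => decide (a ∉ acc)) = [] := by
          simp [he]
        rw [h1, List.nil_append]
        apply List.filter_congr
        intro a _
        by_cases ha : a ∈ acc <;> by_cases hae : a = e <;> simp_all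
      rw [this]
    · simp only [he, if_neg, not_false_iff]
      have : ∀ (l : List Int),
          (acc ++ [e]) ++ (l.filter (fun a => decide (a ∉ acc ++ [e])))
          = acc ++ (([e] ++ l.filter (fun a => decide (a ∉ [e]))).filter (fun a => decide (a ∉ acc))) := by
        intro l
        simp only [List.filter_append, List.filter_filter, List.append_assoc]
        congr 1
        have h1 : ([e] : List Int).filter (fun a => decide (a ∉ acc)) = [e] := by
          simp [he]
        rw [h1]
        congr 1
        apply List.filter_congr
        intro a _
        by_cases ha : a ∈ acc <;> by_cases hae : a = e <;> simp_all
      rw [this]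

-- Set.add IS that loop body
theorem pvFoldAdd_eq (t : List Int) (acc : List Int) :
    t.foldl PySem.Set.add acc
      = t.foldl (fun result element =>
          if element ∈ result then result else result ++ [element]) acc := by
  apply PySem.List.foldl_congr_mem
  intro r x _
  by_cases h : x ∈ r <;> simp [h]

theorem pvOfList_acc (t : List Int) : ∀ acc : List Int,
    t.foldl PySem.Set.add acc
      = acc ++ (PySem.Set.ofList t).filter (fun x => decide (x ∉ acc)) := by
  intro acc
  rw [pvFoldAdd_eq, pvFoldA_acc, PySem.Set.ofList_eq_foldl, pvFoldAdd_eq]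

-- ofList of a cons: head first, the rest with the head filtered out
theorem pvOfList_cons (a : Int) (t : List Int) :
    PySem.Set.ofList (a :: t)
      = a :: (PySem.Set.ofList t).filter (fun x => decide (x ≠ a)) := by
  rw [PySem.Set.ofList_eq_foldl]
  simp only [List.foldl_cons]
  have h : PySem.Set.add [] a = [a] := by simp
  rw [h, pvOfList_acc t [a]]
  simp

-- the recorded last index of a member is in [0, l.length)
theorem pvLastDict_getD_bounds (l : List Int) :
    ∀ b ∈ l, 0 ≤ (pvLastDict l).getD b 0 ∧ (pvLastDict l).getD b 0 < (l.length : Int) := by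
  induction l using List.reverseRecOn with
  | nil => intro b hb; simp at hb
  | append_singleton l a ih =>
    intro b hb
    rw [pvLastDict_append, PySem.Dict.getD_insert]
    by_cases hba : b = a
    · simp [hba]
    · have hbl : b ∈ l := by
        rcases List.mem_append.mp hb with h | h
        · exact h
        · simp at h; exact absurd h hba
      have := ih b hbl
      simp only [hba, if_neg, not_false_iff, List.length_append, List.length_singleton]
      push_cast
      omega

-- keys of the last-index dict, in first-insertion order
theorem pvLastDict_keys (l : List Int) :
    (pvLastDict l).keys = PySem.Set.ofList l := by
  unfold pvLastDict
  rw [PySem.Dict.keys_foldl_insert_key (PySem.List.enumerate l) Prod.snd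
        (fun _ p => p.1) PySem.Dict.empty]
  rw [PySem.List.map_snd_enumerate]
  rfl

-- A's output lists the distinct elements in strictly decreasing last-index order
theorem pvPairwise (l : List Int) :
    (PySem.Set.ofList l.reverse).Pairwise
      (fun a b => (pvLastDict l).getD b 0 < (pvLastDict l).getD a 0) := by
  induction l using List.reverseRecOn with
  | nil => simp
  | append_singleton l a ih =>
    rw [List.reverse_append, List.reverse_singleton, List.singleton_append,
        pvOfList_cons, pvLastDict_append]
    constructor
    · intro b hb
      have hb' := List.mem_filter.mp hb
      have hba : b ≠ a := by simpa using hb'.2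
      have hbl : b ∈ l := List.mem_reverse.mp ((PySem.Set.mem_ofList _ _).mp hb'.1)
      rw [PySem.Dict.getD_insert, PySem.Dict.getD_insert]
      simp only [hba, if_neg, not_false_iff]

      exact (pvLastDict_getD_bounds l b hbl).2
    · apply List.Pairwise.imp_of_mem _ (ih.filter _)
      intro x y hx hy hR
      have hxa : x ≠ a := by simpa using (List.mem_filter.mp hx).2
      have hya : y ≠ a := by simpa using (List.mem_filter.mp hy).2
      rw [PySem.Dict.getD_insert, PySem.Dict.getD_insert]
      simp only [hxa, hya, if_neg, not_false_iff]
      exact hR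

-- ===== VERDICT (by name: the statement is the Claim_ definition above) =====
theorem reverse_unique_spec : Claim_equal_reverse_unique := by
  intro l _
  unfold Spec_reverse_unique reverse_unique_alt
  show reverse_unique l
      = PySem.List.sorted (pvLastDict l).keys (fun x => (pvLastDict l).getD x 0) true
  rw [pvA_eq_ofList, pvLastDict_keys]
  symm
  apply PySem.List.sorted_rev_eq_of_perm_of_pairwise_gt
  · exact ((List.perm_ext_iff_of_nodup (PySem.Set.nodup_ofList _)
      (PySem.Set.nodup_ofList _)).mpr (by
        intro x; simp [PySem.Set.mem_ofList]))
  · exact pvPairwise l
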